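-- pv_equiv track=rewrite | github.com/djachenko/booklist | data_preparator/parser.py | extract_from_column
-- ===== SOURCE A (Python) =====
-- def extract_from_column(table, column_name):
--     extracted_data = {}
--
--     for row in table:
--         extracted = row[column_name]
--
--         if extracted not in extracted_data:
--             extracted_data[extracted] = len(extracted_data)
--
--         row[column_name] = [extracted_data[extracted]]
--
--     return extracted_data
-- ===== SOURCE B (Python) =====
-- def extract_from_column(table, column_name):
--     # Closed-form rank: a value's index is the number of distinct values that
--     # appear strictly before its first occurrence in the column; no incremental
--     # map is maintained (each rank is recomputed from a slice of the column).
--     vals = [row[column_name] for row in table]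
--
--     def rank(v):
--         return len(set(vals[:vals.index(v)]))
--
--     for row in table:
--         row[column_name] = [rank(row[column_name])]
--
--     return {v: rank(v) for v in dict.fromkeys(vals)}
-- ===== Notes on version B (the rewrite author's own statement) =====
-- stated objective: alternative
-- what changed: Drops A's incrementally maintained value-to-index dict entirely: B defines each value's index by a closed form, rank(v) = number of distinct values in the column slice before v's first occurrence (len(set(vals[:vals.index(v)]))), recomputed per cell via nested scans, and builds the returned mapping from the deduplicated column with that rank.
import Mathlib
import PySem

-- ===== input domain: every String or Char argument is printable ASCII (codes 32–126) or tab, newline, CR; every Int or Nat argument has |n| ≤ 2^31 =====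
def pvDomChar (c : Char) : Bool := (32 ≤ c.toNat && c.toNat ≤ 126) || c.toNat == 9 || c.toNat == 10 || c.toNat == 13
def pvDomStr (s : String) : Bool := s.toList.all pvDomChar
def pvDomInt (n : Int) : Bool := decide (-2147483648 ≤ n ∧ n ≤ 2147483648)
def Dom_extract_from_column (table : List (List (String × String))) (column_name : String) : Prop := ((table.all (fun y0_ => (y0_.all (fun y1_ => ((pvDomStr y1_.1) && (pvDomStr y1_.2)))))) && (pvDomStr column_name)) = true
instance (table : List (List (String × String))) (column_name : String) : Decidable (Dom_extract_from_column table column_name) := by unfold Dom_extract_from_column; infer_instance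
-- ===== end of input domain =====

-- B drops A's incrementally built value→index dict: each value's index is computed by the
-- closed form 'number of distinct values before its first occurrence' (nested scans); the
-- equivalence is about the RETURN value only — both Pythons also rewrite the rows' cells in place.

-- ===== PORT A =====
-- row[column_name] on a dict (assoc list, first match); none = KeyError
def pvRowGet (row : List (String × String)) (c : String) : Option String :=
  (row.find? (fun p => p.1 == c)).map (·.2)

-- one iteration of A's loop over the accumulator dict; none = the loop has raised
def pvStepA (column_name : String) (od : Option (List (String × Int)))
    (row : List (String × String)) : Option (List (String × Int)) :=
  match od with
  | none => none
  | some extracted_data =>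
    match pvRowGet row column_name with
    | none => none                                  -- KeyError
    | some extracted =>
      if ((extracted_data.find? (fun p => p.1 == extracted)).isSome) then
        some extracted_data                          -- key already present
      else
        some (extracted_data ++ [(extracted, (extracted_data.length : Int))])

def extract_from_column (table : List (List (String × String))) (column_name : String) : List (String × Int) :=
  (table.foldl (pvStepA column_name) (some [])).getD []

-- ===== PORT B =====
-- len(set(vals[:vals.index(v)])); vals[:k] with a Nat index is List.take; rank is only
-- applied to members of vals, where index? is some (the getD 0 default is never used there)
def pvRank (vals : List String) (v : String) : Int :=
  ((PySem.Set.ofList (vals.take ((PySem.List.index? vals v).getD 0))).length : Int)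

def extract_from_column_alt (table : List (List (String × String))) (column_name : String) : List (String × Int) :=
  let vals := table.map (fun row => (pvRowGet row column_name).getD "")
  (PySem.List.dedup vals).map (fun v => (v, pvRank vals v))

-- ===== PRECONDITION & SPEC =====
-- Pre_ excludes exactly the tables with a row lacking column_name, where Python A raises KeyError.
def Pre_extract_from_column (table : List (List (String × String))) (column_name : String) : Prop :=
  ∀ row ∈ table, column_name ∈ row.map Prod.fst
instance (table : List (List (String × String))) (column_name : String) : Decidable (Pre_extract_from_column table column_name) := by unfold Pre_extract_from_column; infer_instance

def pvWitness_extract_from_column : (List (List (String × String))) × String :=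
  ([[("a", "x")], [("a", "y")], [("a", "x")]], "a")

def Spec_extract_from_column (table : List (List (String × String))) (column_name : String) (out : List (String × Int)) : Prop := out = extract_from_column_alt table column_name
instance (table : List (List (String × String))) (column_name : String) (out : List (String × Int)) : Decidable (Spec_extract_from_column table column_name out) := by unfold Spec_extract_from_column; infer_instance

-- ===== CLAIM (what is proved, stated in full; the proofs are below) =====
def Claim_equal_extract_from_column : Prop := ∀ (table : List (List (String × String))) (column_name : String), Dom_extract_from_column table column_name → Pre_extract_from_column table column_name → Spec_extract_from_column table column_name (extract_from_column table column_name)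

-- ===== LEMMAS AND PROOFS =====

-- {v: i for i, v in enumerate(s)} over a distinct list s = the enumerated pair list
def pvEnum (s : List String) : List (String × Int) :=
  s.zipIdx.map (fun p => (p.1, (p.2 : Int)))

theorem pvEnum_keys (s : List String) : (pvEnum s).map Prod.fst = s := by
  simp [pvEnum, List.map_map, Function.comp_def]

theorem pvEnum_length (s : List String) : (pvEnum s).length = s.length := by
  simp [pvEnum]

theorem pvEnum_find?_isSome (s : List String) (v : String) :
    ((pvEnum s).find? (fun p => p.1 == v)).isSome = decide (v ∈ s) := by
  rcases h : (pvEnum s).find? (fun p => p.1 == v) with _ | p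
  · have hv : v ∉ s := by
      intro hv
      rw [← pvEnum_keys s] at hv
      rcases List.mem_map.mp hv with ⟨q, hq, hq1⟩
      exact absurd (by simp [hq1] : (q.1 == v) = true)
        (by simpa using List.find?_eq_none.mp h q hq)
    simp [hv]
    intro a b hab hav
    exact hv (hav ▸ (by rw [← pvEnum_keys s]; exact List.mem_map.mpr ⟨(a, b), hab, rfl⟩ : a ∈ s))
  · have hv : v ∈ s := by
      have h1 : p.1 = v := by simpa using List.find?_some h
      rw [← pvEnum_keys s]
      exact List.mem_map.mpr ⟨p, List.mem_of_find?_eq_some h, h1⟩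
    simp [h, hv]

theorem pvEnum_append (s : List String) (v : String) :
    pvEnum (s ++ [v]) = pvEnum s ++ [(v, (s.length : Int))] := by
  simp [pvEnum, List.zipIdx_append]

theorem pvFoldA (c : String) (rows : List (List (String × String))) :
    ∀ (s : List String), s.Nodup →
    (∀ row ∈ rows, c ∈ row.map Prod.fst) →
    rows.foldl (pvStepA c) (some (pvEnum s)) =
      some (pvEnum (PySem.Set.update s (rows.map (fun row => (pvRowGet row c).getD "")))) := by
  induction rows with
  | nil => intro s _ _; simp [PySem.Set.update]
  | cons row rows ih =>
    intro s hnd hpre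
    have hmem : c ∈ row.map Prod.fst := hpre row (by simp)
    rcases List.mem_map.mp hmem with ⟨q, hq, hq1⟩
    have hsome : ∃ x, pvRowGet row c = some x := by
      have : (row.find? (fun p => p.1 == c)).isSome := by
        rw [List.find?_isSome]
        exact ⟨q, hq, by simp [hq1]⟩
      rcases Option.isSome_iff_exists.mp this with ⟨p, hp⟩
      exact ⟨p.2, by simp [pvRowGet, hp]⟩
    rcases hsome with ⟨v, hv⟩
    have hval : (pvRowGet row c).getD "" = v := by simp [hv]
    simp only [List.foldl_cons, List.map_cons, PySem.Set.update_cons]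
    by_cases hmv : v ∈ s
    · have hstep : pvStepA c (some (pvEnum s)) row = some (pvEnum s) := by
        simp [pvStepA, hv, pvEnum_find?_isSome, hmv]
      rw [hstep, hval, PySem.Set.add_of_mem hmv]
      exact ih s hnd (fun r hr => hpre r (by simp [hr]))
    · have hstep : pvStepA c (some (pvEnum s)) row
          = some (pvEnum s ++ [(v, ((pvEnum s).length : Int))]) := by
        simp [pvStepA, hv, pvEnum_find?_isSome, hmv]
      rw [hstep, pvEnum_length, ← pvEnum_append, hval, PySem.Set.add_of_not_mem hmv]
      have hnd' : (s ++ [v]).Nodup := by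
        refine List.Nodup.append hnd (List.nodup_singleton v) (fun a ha hb => ?_)
        simp only [List.mem_singleton] at hb
        exact hmv (hb ▸ ha)
      exact ih (s ++ [v]) hnd' (fun r hr => hpre r (by simp [hr]))

-- rank is stable under appending one more value, for values already in the list
theorem pvRank_append (xs : List String) (x v : String) (hv : v ∈ xs) :
    pvRank (xs ++ [x]) v = pvRank xs v := by
  rw [pvRank, pvRank, PySem.List.index?_append_of_mem [x] hv]
  rcases h : PySem.List.index? xs v with _ | k
  · exact absurd hv ((PySem.List.index?_eq_none_iff xs v).mp h)
  · have hk : k < xs.length := by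
      rcases (PySem.List.index?_eq_some_iff xs v k).mp h with ⟨pre, suf, hx, hlen, _⟩
      simp [hx, ← hlen]
    simp [List.take_append_of_le_length (Nat.le_of_lt hk)]

-- rank of a fresh value appended at the end = number of distinct earlier values
theorem pvRank_append_self (xs : List String) (x : String) (hx : x ∉ xs) :
    pvRank (xs ++ [x]) x = ((PySem.Set.ofList xs).length : Int) := by
  rw [pvRank, PySem.List.index?_append_singleton_self xs x hx]
  simp

-- the core characterisation: mapping rank over the deduplicated column is exactly the
-- enumeration of the distinct values in first-occurrence order
theorem pvRankMap (vals : List String) :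
    (PySem.Set.ofList vals).map (fun v => (v, pvRank vals v)) = pvEnum (PySem.Set.ofList vals) := by
  induction vals using List.reverseRecOn with
  | nil => simp [pvEnum, PySem.Set.ofList]
  | append_singleton xs x ih =>
    have hmap : ∀ v ∈ PySem.Set.ofList xs,
        (fun v => (v, pvRank (xs ++ [x]) v)) v = (fun v => (v, pvRank xs v)) v := by
      intro v hvmem
      have hv : v ∈ xs := (PySem.Set.mem_ofList xs v).mp hvmem
      simp [pvRank_append xs x v hv]
    by_cases hx : x ∈ xs
    · rw [PySem.Set.ofList_append_singleton, PySem.Set.add_of_mem ((PySem.Set.mem_ofList xs x).mpr hx),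
        List.map_congr_left hmap, ih]
    · rw [PySem.Set.ofList_append_singleton, PySem.Set.add_of_not_mem (fun h => hx ((PySem.Set.mem_ofList xs x).mp h)), List.map_append,
        List.map_congr_left hmap, ih, pvEnum_append]
      simp [pvRank_append_self xs x hx]

-- ===== VERDICT (by name: the statement is the Claim_ definition above) =====
theorem extract_from_column_spec : Claim_equal_extract_from_column := by
  intro table column_name _ hpre
  unfold Spec_extract_from_column extract_from_column extract_from_column_alt
  have h0 : (some ([] : List (String × Int))) = some (pvEnum []) := by simp [pvEnum]
  rw [h0, pvFoldA column_name table [] List.nodup_nil hpre, PySem.Set.update_nil_left]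
  simp [PySem.List.dedup_eq_ofList, pvRankMap]
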